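-- pv_equiv track=rewrite | github.com/azoght/voting-systems | main.py | containsBoth
-- ===== SOURCE A (Python) =====
-- def containsBoth(l: [],a1,a2) -> bool:
--     count1 = 0
--     count2 = 0
--     for i in l:
--         if l[i] == a1:
--             count1 += 1
--         if l[i] == a2:
--             count2 += 1
--     if count1 > 0 and count2 > 0:
--         return True
--     return False
-- ===== SOURCE B (Python) =====
-- def containsBoth(l: [], a1, a2) -> bool:
--     vs = l.values()
--     return a1 in vs and a2 in vs
-- ===== Notes on version B (the rewrite author's own statement) =====
-- stated objective: idiomatic
-- what changed: A loops over the dict's keys, looks each value up with l[i] and maintains two counters; B drops the loop and counters entirely and tests membership of a1 and a2 in the values view directly.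
import Mathlib
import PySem

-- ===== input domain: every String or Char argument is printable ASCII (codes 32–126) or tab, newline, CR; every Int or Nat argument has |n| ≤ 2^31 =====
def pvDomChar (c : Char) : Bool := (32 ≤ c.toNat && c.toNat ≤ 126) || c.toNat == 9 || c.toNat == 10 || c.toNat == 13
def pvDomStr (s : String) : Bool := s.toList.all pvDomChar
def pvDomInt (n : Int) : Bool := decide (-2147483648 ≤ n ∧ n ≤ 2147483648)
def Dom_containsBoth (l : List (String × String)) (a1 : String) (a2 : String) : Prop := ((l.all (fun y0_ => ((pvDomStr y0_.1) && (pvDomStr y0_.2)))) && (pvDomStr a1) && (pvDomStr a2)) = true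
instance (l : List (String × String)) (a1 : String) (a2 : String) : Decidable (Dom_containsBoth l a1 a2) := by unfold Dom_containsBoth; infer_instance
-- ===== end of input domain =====

-- B replaces A's key-loop with two counters by two direct membership tests on the values view (same cost, idiomatic).
-- ===== PORT A =====
-- A: 'for i in l: if l[i] == a1: count1 += 1; if l[i] == a2: count2 += 1' over a dict l,
-- then 'count1 > 0 and count2 > 0'. The dict is the association list l (unique keys, Pre_);
-- 'for i in l' iterates the keys in order and 'l[i]' is the first-match lookup.
def containsBothCounts (l : List (String × String)) (a1 : String) (a2 : String) : Int × Int :=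
  (l.map Prod.fst).foldl (fun (c : Int × Int) i =>
    match l.find? (fun q => q.1 == i) with
    | some p =>
        (if p.2 == a1 then c.1 + 1 else c.1,
         if p.2 == a2 then c.2 + 1 else c.2)
    | none => c)  -- unreachable: i is drawn from l's own keys, so the lookup succeeds
    (0, 0)

def containsBoth (l : List (String × String)) (a1 : String) (a2 : String) : Bool :=
  if (containsBothCounts l a1 a2).1 > 0 && (containsBothCounts l a1 a2).2 > 0 then true
  else false

-- ===== PORT B =====
-- B: 'vs = l.values(); return a1 in vs and a2 in vs'; the values view of the
-- association list is l.map Prod.snd, 'in' is membership with string equality.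
def containsBoth_alt (l : List (String × String)) (a1 : String) (a2 : String) : Bool :=
  (l.map Prod.snd).contains a1 && (l.map Prod.snd).contains a2

-- ===== PRECONDITION & SPEC =====
-- Pre_ requires the association list to have distinct keys: it then represents a Python
-- dict (no Python dict has duplicate keys, so no input of A is excluded).
def Pre_containsBoth (l : List (String × String)) (a1 : String) (a2 : String) : Prop :=
  (l.map Prod.fst).Nodup
instance (l : List (String × String)) (a1 : String) (a2 : String) : Decidable (Pre_containsBoth l a1 a2) := by unfold Pre_containsBoth; infer_instance

def pvWitness_containsBoth : (List (String × String)) × String × String := ([("x", "a"), ("y", "b")], "a", "b")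

def Spec_containsBoth (l : List (String × String)) (a1 : String) (a2 : String) (out : Bool) : Prop := out = containsBoth_alt l a1 a2
instance (l : List (String × String)) (a1 : String) (a2 : String) (out : Bool) : Decidable (Spec_containsBoth l a1 a2 out) := by unfold Spec_containsBoth; infer_instance

-- ===== CLAIM (what is proved, stated in full; the proofs are below) =====
def Claim_equal_containsBoth : Prop := ∀ (l : List (String × String)) (a1 : String) (a2 : String), Dom_containsBoth l a1 a2 → Pre_containsBoth l a1 a2 → Spec_containsBoth l a1 a2 (containsBoth l a1 a2)

-- ===== LEMMAS AND PROOFS =====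

-- with distinct keys, looking a pair's own key back up in l finds that pair
theorem find_key_self {l : List (String × String)} (hnd : (l.map Prod.fst).Nodup)
    {p : String × String} (hp : p ∈ l) :
    l.find? (fun q => q.1 == p.1) = some p := by
  induction l with
  | nil => cases hp
  | cons q t ih =>
    simp only [List.map_cons, List.nodup_cons] at hnd
    rcases List.mem_cons.mp hp with h | h
    · subst h
      simp [List.find?]
    · have hne : q.1 ≠ p.1 := by
        intro he
        exact hnd.1 (he ▸ List.mem_map.mpr ⟨p, h, rfl⟩)
      simp only [List.find?]
      rw [show (q.1 == p.1) = false from beq_eq_false_iff_ne.mpr hne]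
      exact ih hnd.2 h

-- A's counter fold, once the lookups are resolved, counts occurrences among the values
theorem fold_count (l : List (String × String)) (a1 a2 : String) (c : Int × Int) :
    l.foldl (fun (c : Int × Int) p =>
      (if p.2 == a1 then c.1 + 1 else c.1,
       if p.2 == a2 then c.2 + 1 else c.2)) c
    = (c.1 + (l.map Prod.snd).count a1, c.2 + (l.map Prod.snd).count a2) := by
  induction l generalizing c with
  | nil => simp
  | cons p t ih =>
    simp only [List.foldl_cons, List.map_cons, List.count_cons, ih, Prod.mk.injEq]
    constructor <;> split_ifs <;> push_cast <;> ring

-- ===== VERDICT (by name: the statement is the Claim_ definition above) =====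
theorem containsBoth_spec : Claim_equal_containsBoth := by
  intro l a1 a2 _ hpre
  unfold Spec_containsBoth containsBoth containsBothCounts containsBoth_alt
  rw [List.foldl_map]
  rw [PySem.List.foldl_congr_mem l
      (fun (x : Int × Int) (y : String × String) =>
        match l.find? (fun q => q.1 == y.1) with
        | some p =>
            (if p.2 == a1 then x.1 + 1 else x.1,
             if p.2 == a2 then x.2 + 1 else x.2)
        | none => x)
      (fun (x : Int × Int) (y : String × String) =>
        (if y.2 == a1 then x.1 + 1 else x.1,
         if y.2 == a2 then x.2 + 1 else x.2))
      ((0 : Int), (0 : Int))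
      (by intro x y hy; simp only [find_key_self hpre hy])]
  rw [fold_count]
  simp only [zero_add, gt_iff_lt, Int.natCast_pos, List.count_pos_iff]
  simp
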